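-- pv_equiv track=rewrite | github.com/isaiahjon3s/up-all-night | beachouse.py | beachouse
-- ===== SOURCE A (Python) =====
-- def beachouse(s: str) -> str: # Returns string with any double letters (word end letter same as next word start letter) removed
--     housed = ""
--     i = 0
--     while i < len(s):
--         letter = s[i]
--         if letter == " " and i > 0 and i < len(s) - 1:
--             if s[i-1] == s[i+1]:  # previous char equals next char
--                 housed += s[i+1]  # add the next character
--                 i += 2  # skip the next character since we already added it
--             else:
--                 housed += letter
--                 i += 1
--         else:
--             housed += letter
--             i += 1
--     return housed
-- ===== SOURCE B (Python) =====
-- def beachouse(s: str) -> str: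
--     # One-pass state machine: no indexing, no lookahead; a seen space is held
--     # "pending" and resolved when the next character arrives.
--     out = []
--     prev = None       # last consumed character (None at the very start)
--     pending = False   # an interior space waiting to see the next character
--     for c in s:
--         if pending:
--             if c == prev:
--                 out.append(c)          # drop the space, keep the repeated char
--                 prev = c
--             else:
--                 out.append(" ")
--                 prev = " "
--                 if c == " ":
--                     continue           # this new space becomes pending itself
--                 out.append(c)
--                 prev = c
--             pending = False
--         elif c == " " and prev is not None:
--             pending = True
--         else:
--             out.append(c)
--             prev = c
--     if pending:
--         out.append(" ")                # trailing space is kept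
--     return "".join(out)
-- ===== Notes on version B (the rewrite author's own statement) =====
-- stated objective: faster
-- what changed: A's index-based while loop with i+=2 skips, lookups of s[i-1]/s[i+1], and quadratic string += is replaced by a single forward pass keeping no indices: a pending-space state machine remembering only the previous character and whether a space awaits resolution, appending to a list and joining once.
import Mathlib
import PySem

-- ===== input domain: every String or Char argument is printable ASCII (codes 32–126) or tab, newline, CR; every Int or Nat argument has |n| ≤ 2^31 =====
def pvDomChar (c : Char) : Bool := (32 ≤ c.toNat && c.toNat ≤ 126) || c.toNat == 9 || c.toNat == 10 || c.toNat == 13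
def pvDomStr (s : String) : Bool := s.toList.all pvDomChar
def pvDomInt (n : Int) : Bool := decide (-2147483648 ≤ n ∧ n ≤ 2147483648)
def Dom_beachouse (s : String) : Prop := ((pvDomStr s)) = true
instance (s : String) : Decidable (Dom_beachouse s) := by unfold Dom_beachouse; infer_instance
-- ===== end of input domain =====

-- B replaces A's index loop with lookahead (and quadratic string +=) by a one-pass pending-space state machine; objective: faster (measured).

-- ===== PORT A =====
-- A's while loop over the index i; in-range reads s[i-1], s[i], s[i+1] become getD.
def beachouseGoA (cs : List Char) (i : Nat) (housed : List Char) : List Char :=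
  if h : i < cs.length then
    let letter := cs.getD i ' '
    if letter = ' ' ∧ 0 < i ∧ i < cs.length - 1 then
      if cs.getD (i - 1) ' ' = cs.getD (i + 1) ' ' then
        beachouseGoA cs (i + 2) (housed ++ [cs.getD (i + 1) ' '])
      else
        beachouseGoA cs (i + 1) (housed ++ [letter])
    else
      beachouseGoA cs (i + 1) (housed ++ [letter])
  else housed
termination_by cs.length - i
decreasing_by all_goals omega

def beachouse (s : String) : String := String.mk (beachouseGoA s.toList 0 [])

-- ===== PORT B =====
-- B's for loop with state (out, prev, pending), transliterated as structural recursion on the characters.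
def beachouseGoB (cs : List Char) (prev : Option Char) (pending : Bool) (out : List Char) : List Char :=
  match cs with
  | [] => if pending then out ++ [' '] else out
  | c :: rest =>
    if pending then
      if some c = prev then beachouseGoB rest (some c) false (out ++ [c])
      else if c = ' ' then beachouseGoB rest (some ' ') true (out ++ [' '])
      else beachouseGoB rest (some c) false (out ++ [' ', c])
    else if c = ' ' ∧ prev ≠ none then beachouseGoB rest prev true out
    else beachouseGoB rest (some c) false (out ++ [c])

def beachouse_alt (s : String) : String := String.mk (beachouseGoB s.toList none false [])

-- ===== PRECONDITION & SPEC =====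
def Spec_beachouse (s : String) (out : String) : Prop := out = beachouse_alt s
instance (s : String) (out : String) : Decidable (Spec_beachouse s out) := by unfold Spec_beachouse; infer_instance

-- ===== CLAIM (what is proved, stated in full; the proofs are below) =====
def Claim_equal_beachouse : Prop := ∀ (s : String), Dom_beachouse s → Spec_beachouse s (beachouse s)

-- ===== LEMMAS AND PROOFS =====

-- One-step reductions of B's state machine, one per branch of its loop body.
theorem goB_nil_false (p : Option Char) (out : List Char) :
    beachouseGoB [] p false out = out := by simp [beachouseGoB]

theorem goB_nil_true (p : Option Char) (out : List Char) :
    beachouseGoB [] p true out = out ++ [' '] := by simp [beachouseGoB]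

theorem goB_space (p : Char) (rest out : List Char) :
    beachouseGoB (' ' :: rest) (some p) false out = beachouseGoB rest (some p) true out := by
  simp [beachouseGoB]

theorem goB_char {c : Char} (hc : c ≠ ' ') (p : Option Char) (rest out : List Char) :
    beachouseGoB (c :: rest) p false out = beachouseGoB rest (some c) false (out ++ [c]) := by
  simp [beachouseGoB, hc]

theorem goB_pend_eq (c : Char) (rest out : List Char) :
    beachouseGoB (c :: rest) (some c) true out = beachouseGoB rest (some c) false (out ++ [c]) := by
  simp [beachouseGoB]

theorem goB_pend_space {p : Char} (hp : p ≠ ' ') (rest out : List Char) :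
    beachouseGoB (' ' :: rest) (some p) true out = beachouseGoB rest (some ' ') true (out ++ [' ']) := by
  simp [beachouseGoB]
  exact fun h => absurd h.symm hp

theorem goB_pend_char {c p : Char} (hcp : c ≠ p) (hc : c ≠ ' ') (rest out : List Char) :
    beachouseGoB (c :: rest) (some p) true out = beachouseGoB rest (some c) false (out ++ [' ', c]) := by
  simp [beachouseGoB, hcp, hc]

-- Invariant: from index i ≥ 1, A's loop equals B's machine run on the remaining
-- characters with prev = s[i-1] and no pending space.
theorem beachouse_main (n : Nat) : ∀ (cs : List Char) (i : Nat) (acc : List Char),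
    cs.length - i ≤ n → 1 ≤ i → i ≤ cs.length →
    beachouseGoA cs i acc = beachouseGoB (cs.drop i) (some (cs.getD (i - 1) ' ')) false acc := by
  induction n with
  | zero =>
    intro cs i acc hm h1 h2
    have hi : i = cs.length := by omega
    subst hi
    rw [beachouseGoA, List.drop_length, goB_nil_false]
    simp
  | succ n ih =>
    intro cs i acc hm h1 h2
    by_cases hlt : i < cs.length
    · have hdropi : cs.drop i = cs.getD i ' ' :: cs.drop (i + 1) := by
        rw [List.getD_eq_getElem _ _ hlt, List.drop_eq_getElem_cons hlt]
      rw [beachouseGoA, dif_pos hlt]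
      by_cases hsp : cs.getD i ' ' = ' ' ∧ 0 < i ∧ i < cs.length - 1
      · -- interior space: B goes pending, then resolves on the next character
        have hlt1 : i + 1 < cs.length := by omega
        have hdrop1 : cs.drop (i + 1) = cs.getD (i + 1) ' ' :: cs.drop (i + 2) := by
          rw [List.getD_eq_getElem _ _ hlt1, List.drop_eq_getElem_cons hlt1]
        rw [if_pos hsp, hdropi, hsp.1, goB_space, hdrop1]
        by_cases heq : cs.getD (i - 1) ' ' = cs.getD (i + 1) ' '
        · rw [if_pos heq, ih cs (i + 2) _ (by omega) (by omega) (by omega),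
            show i + 2 - 1 = i + 1 from by omega, ← heq, goB_pend_eq]
        · rw [if_neg heq, ih cs (i + 1) _ (by omega) (by omega) (by omega),
            show i + 1 - 1 = i from by omega, hsp.1, hdrop1]
          have hne : cs.getD (i + 1) ' ' ≠ cs.getD (i - 1) ' ' := fun h => heq h.symm
          by_cases hc2 : cs.getD (i + 1) ' ' = ' '
          · rw [hc2, goB_space, goB_pend_space (fun h => heq (h.trans hc2.symm))]
          · rw [goB_char hc2, goB_pend_char hne hc2]
            simp
      · rw [if_neg hsp]
        by_cases hc : cs.getD i ' ' = ' '
        · -- space at the very last position (i = length - 1): emitted, loop ends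
          have hi' : i = cs.length - 1 := by
            have : ¬ i < cs.length - 1 := fun hx => hsp ⟨hc, h1, hx⟩
            omega
          have hdrop1 : cs.drop (i + 1) = [] := List.drop_eq_nil_of_le (by omega)
          rw [hdropi, hdrop1, hc, goB_space, goB_nil_true, beachouseGoA,
            dif_neg (by omega : ¬ i + 1 < cs.length)]
        · -- ordinary character
          rw [hdropi, goB_char hc, ih cs (i + 1) _ (by omega) (by omega) (by omega),
            show i + 1 - 1 = i from by omega]
    · have hi : i = cs.length := by omega
      subst hi
      rw [beachouseGoA, List.drop_length, goB_nil_false]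
      simp

theorem beachouse_lists (cs : List Char) :
    beachouseGoA cs 0 [] = beachouseGoB cs none false [] := by
  cases cs with
  | nil => rw [beachouseGoA]; simp [beachouseGoB]
  | cons c rest =>
    rw [beachouseGoA, dif_pos (by simp : 0 < (c :: rest).length),
      if_neg (by simp : ¬ ((c :: rest).getD 0 ' ' = ' ' ∧ 0 < 0 ∧ 0 < (c :: rest).length - 1)),
      beachouse_main ((c :: rest).length) (c :: rest) 1 _ (by omega) le_rfl (by simp)]
    conv_rhs => rw [beachouseGoB]
    simp [List.getD]

-- ===== VERDICT (by name: the statement is the Claim_ definition above) =====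
theorem beachouse_spec : Claim_equal_beachouse := by
  intro s _
  unfold Spec_beachouse beachouse beachouse_alt
  rw [beachouse_lists]
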